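-- pv_equiv track=rewrite | github.com/ankitson/aoc | 2023/python/day12/soln1.py | genruns
-- ===== SOURCE A (Python) =====
-- def genruns(row):
--   runs = []
--   curr_run = row[0]
--   run_len = 1 if row[0] != '.' else 0
--   run_start = 0 if row[0] != '.' else None
--   for i in range(1,len(row)):
--     char = row[i]
--     if char == '.':
--       pass
--     elif char == curr_run:
--       run_len += 1
--     else:
--       if run_len > 0:
--         runs.append((run_start,run_len))
--       run_start = i
--       run_len = 1
--     curr_run = char
--   if run_len > 0:
--     runs.append((run_start,run_len))
--   return runs
-- ===== SOURCE B (Python) =====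
-- import re
--
-- def genruns(row):
--   return [(m.start(), len(m.group())) for m in re.finditer(r'([^.])\1*', row)]
-- ===== Notes on version B (the rewrite author's own statement) =====
-- stated objective: idiomatic
-- what changed: Replaces the hand-written state-machine scan (curr_run/run_len/run_start bookkeeping) with a single regex pass: re.finditer(r'([^.])\1*', row) yields each maximal run of identical non-dot characters directly.
-- outside the precondition, e.g. on genruns(''): A raises IndexError, B returns []
import Mathlib
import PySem

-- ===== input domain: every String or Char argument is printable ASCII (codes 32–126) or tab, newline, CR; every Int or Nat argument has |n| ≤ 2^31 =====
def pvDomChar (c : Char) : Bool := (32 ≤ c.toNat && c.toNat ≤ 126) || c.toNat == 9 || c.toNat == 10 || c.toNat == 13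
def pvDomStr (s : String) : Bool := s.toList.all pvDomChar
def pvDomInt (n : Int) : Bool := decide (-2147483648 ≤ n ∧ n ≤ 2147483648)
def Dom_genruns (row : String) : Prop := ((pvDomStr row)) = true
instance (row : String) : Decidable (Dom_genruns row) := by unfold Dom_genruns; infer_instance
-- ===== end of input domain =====

-- B replaces A's explicit state-machine scan by one regex pass (re.finditer(r'([^.])\1*'))
-- emitting each maximal run of identical non-dot characters directly; idiomatic, same cost.
-- A raises IndexError on the empty string (excluded by Pre_); B returns [] there.

-- ===== PORT A =====
-- A's for-loop over range(1, len(row)) with state (runs, curr_run, run_len, run_start);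
-- run_start is Python's None/int, ported as Option Int (it is `some _` whenever run_len > 0,
-- the only time it is read, so `.getD 0` is exact there).
def genrunsLoop : List Char → Int → List (Int × Int) → Char → Int → Option Int → List (Int × Int)
  | [], _, runs, _, run_len, run_start =>
      if run_len > 0 then runs ++ [(run_start.getD 0, run_len)] else runs
  | c :: rest, i, runs, curr_run, run_len, run_start =>
      if c == '.' then
        genrunsLoop rest (i + 1) runs c run_len run_start
      else if c == curr_run then
        genrunsLoop rest (i + 1) runs c (run_len + 1) run_start
      else
        genrunsLoop rest (i + 1)
          (if run_len > 0 then runs ++ [(run_start.getD 0, run_len)] else runs)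
          c 1 (some i)

def genruns (row : String) : List (Int × Int) :=
  match row.toList with
  | [] => []  -- Python raises IndexError at row[0]; excluded by Pre_genruns
  | c :: rest =>
      genrunsLoop rest 1 [] c (if c == '.' then 0 else 1) (if c == '.' then none else some 0)

-- ===== PORT B =====
-- Hand port of Source B's regex pass (PySem has no regex): re.finditer(r'([^.])\1*', row)
-- scans left to right; at each position a non-dot char c matches together with the maximal
-- following block of the same char c (what `([^.])\1*` greedily matches), giving
-- (m.start(), len(m.group())); a dot matches nothing and the scan moves on. Exact on all inputs.
def genrunsScan : List Char → Int → List (Int × Int)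
  | [], _ => []
  | c :: rest, i =>
      if c == '.' then genrunsScan rest (i + 1)
      else
        let k := (rest.takeWhile (· == c)).length
        (i, (k : Int) + 1) :: genrunsScan (rest.drop k) (i + (k : Int) + 1)
termination_by l _ => l.length
decreasing_by all_goals simp

def genruns_alt (row : String) : List (Int × Int) :=
  genrunsScan row.toList 0

-- ===== PRECONDITION & SPEC =====
-- Pre_ excludes exactly the empty string, on which A raises IndexError at row[0].
def Pre_genruns (row : String) : Prop := row ≠ ""
instance (row : String) : Decidable (Pre_genruns row) := by unfold Pre_genruns; infer_instance
def pvWitness_genruns : String := "?#?.##."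

def Spec_genruns (row : String) (out : List (Int × Int)) : Prop := out = genruns_alt row
instance (row : String) (out : List (Int × Int)) : Decidable (Spec_genruns row out) := by unfold Spec_genruns; infer_instance

-- ===== CLAIM (what is proved, stated in full; the proofs are below) =====
def Claim_equal_genruns : Prop := ∀ (row : String), Dom_genruns row → Pre_genruns row → Spec_genruns row (genruns row)

-- ===== LEMMAS AND PROOFS =====

-- Combined invariant for A's loop, one statement proved by induction on the remaining list:
-- (1) active state (inside a run of `curr ≠ '.'` of length `len > 0` started at `s`): the loop
--     extends the run by the leading block of `curr` and then agrees with B's scan;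
-- (2) dotted state (last char seen was '.', a pending run of length `len` flushed lazily):
--     the loop emits the pending pair (if any) and then agrees with B's scan.
-- Equation lemmas for B's scan (well-founded recursion does not unfold definitionally).
theorem genrunsScan_nil (i : Int) : genrunsScan [] i = [] := by
  rw [genrunsScan.eq_def]

theorem genrunsScan_dot (rest : List Char) (i : Int) :
    genrunsScan ('.' :: rest) i = genrunsScan rest (i + 1) := by
  rw [genrunsScan.eq_def]; simp

theorem genrunsScan_run (c : Char) (rest : List Char) (i : Int) (h : (c == '.') = false) :
    genrunsScan (c :: rest) i =
      (i, ((rest.takeWhile (· == c)).length : Int) + 1) ::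
        genrunsScan (rest.drop (rest.takeWhile (· == c)).length)
          (i + ((rest.takeWhile (· == c)).length : Int) + 1) := by
  rw [genrunsScan.eq_def]; simp [h]

theorem genrunsLoop_invariant (rest : List Char) :
    (∀ (i : Int) (runs : List (Int × Int)) (curr : Char) (len : Int) (s : Int),
      curr ≠ '.' → 0 < len →
      genrunsLoop rest i runs curr len (some s) =
        runs ++ (s, len + ((rest.takeWhile (· == curr)).length : Int)) ::
          genrunsScan (rest.drop (rest.takeWhile (· == curr)).length)
            (i + ((rest.takeWhile (· == curr)).length : Int))) ∧
    (∀ (i : Int) (runs : List (Int × Int)) (len : Int) (start : Option Int),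
      genrunsLoop rest i runs '.' len start =
        runs ++ (if 0 < len then [(start.getD 0, len)] else []) ++ genrunsScan rest i) := by
  induction rest with
  | nil =>
    refine ⟨fun i runs curr len s hcurr hlen => ?_, fun i runs len start => ?_⟩
    · simp [genrunsLoop, genrunsScan_nil, hlen]
    · by_cases h : 0 < len <;> simp [genrunsLoop, genrunsScan_nil, h]
  | cons c rest ih =>
    refine ⟨fun i runs curr len s hcurr hlen => ?_, fun i runs len start => ?_⟩
    · by_cases hdot : c = '.'
      · subst hdot
        have hne : ('.' == curr) = false := by
          simp only [beq_eq_false_iff_ne, ne_eq]; exact fun h => hcurr h.symm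
        rw [show genrunsLoop ('.' :: rest) i runs curr len (some s)
              = genrunsLoop rest (i + 1) runs '.' len (some s) from by
            simp [genrunsLoop]]
        rw [ih.2]
        have ht : ('.' :: rest).takeWhile (· == curr) = [] := by
          simp [hne]
        rw [ht]
        simp only [List.length_nil, List.drop_zero, Nat.cast_zero, add_zero]
        rw [genrunsScan_dot]
        simp [hlen]
      · have hdne : (c == '.') = false := by simp [hdot]
        by_cases hc : c = curr
        · subst hc
          rw [show genrunsLoop (c :: rest) i runs c len (some s)
                = genrunsLoop rest (i + 1) runs c (len + 1) (some s) from by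
              simp [genrunsLoop, hdne]]
          rw [ih.1 _ _ _ _ _ hdot (by omega)]
          have ht : (c :: rest).takeWhile (· == c) = c :: rest.takeWhile (· == c) := by
            simp
          rw [ht]
          simp only [List.length_cons, List.drop_succ_cons]
          push_cast
          ring_nf
        · have hcne : (c == curr) = false := by simp [hc]
          rw [show genrunsLoop (c :: rest) i runs curr len (some s)
                = genrunsLoop rest (i + 1) (runs ++ [(s, len)]) c 1 (some i) from by
              simp [genrunsLoop, hdne, hcne, hlen]]
          rw [ih.1 _ _ _ _ _ hdot (by omega)]
          have ht : (c :: rest).takeWhile (· == curr) = [] := by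
            simp [hcne]
          rw [ht]
          simp only [List.length_nil, List.drop_zero, Nat.cast_zero, add_zero,
            List.append_assoc, List.cons_append, List.nil_append]
          rw [genrunsScan_run c rest i hdne]
          ring_nf
    · by_cases hdot : c = '.'
      · subst hdot
        rw [show genrunsLoop ('.' :: rest) i runs '.' len start
              = genrunsLoop rest (i + 1) runs '.' len start from by
            simp [genrunsLoop]]
        rw [ih.2, genrunsScan_dot]
      · have hdne : (c == '.') = false := by simp [hdot]
        rw [show genrunsLoop (c :: rest) i runs '.' len start
              = genrunsLoop rest (i + 1)
                  (if 0 < len then runs ++ [(start.getD 0, len)] else runs) c 1 (some i) from by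
            simp [genrunsLoop, hdne]]
        rw [ih.1 _ _ _ _ _ hdot (by omega)]
        rw [genrunsScan_run c rest i hdne]
        by_cases h : 0 < len <;>
          simp [h, List.append_assoc, add_comm, add_left_comm, add_assoc]

-- ===== VERDICT (by name: the statement is the Claim_ definition above) =====
theorem genruns_spec : Claim_equal_genruns := by
  intro row _ hpre
  unfold Spec_genruns genruns genruns_alt
  match h : row.toList with
  | [] =>
    have : row = "" := by
      cases row
      simpa using congrArg String.ofList h
    exact absurd this hpre
  | c :: rest =>
    by_cases hdot : c = '.'
    · subst hdot
      simp only [beq_self_eq_true, if_true]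
      rw [(genrunsLoop_invariant rest).2, genrunsScan_dot]
      simp
    · have hdne : (c == '.') = false := by simp [hdot]
      simp only [hdne, Bool.false_eq_true, if_false]
      rw [(genrunsLoop_invariant rest).1 _ _ _ _ _ hdot (by omega)]
      rw [genrunsScan_run c rest 0 hdne]
      simp [add_comm]
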